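-- pv_equiv track=rewrite | github.com/maiana-hanshaw/CSWR | soundings/2_Convert_IndividualSoundings_to_SPCforSHARPpy/convert_uah2spc.py | pressure_decreasing
-- ===== SOURCE A (Python) =====
-- invalid_value = "-9999"
--
-- def pressure_decreasing(pressure, index, p):
--     lower = True
--     if invalid_value not in pressure:
--         if index != 0:
--             previous_pressure = p[index - 1]
--             if invalid_value in previous_pressure:
--                 lower = pressure_decreasing(pressure, index -1, p)
--             else:
--                 lower = pressure < previous_pressure
--     return lower
-- ===== SOURCE B (Python) =====
-- invalid_value = "-9999"
--
-- def pressure_decreasing(pressure, index, p):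
--     if invalid_value in pressure:
--         return True
--     for prev in reversed(p[:index]):
--         if invalid_value not in prev:
--             return pressure < prev
--     return True
-- ===== Notes on version B (the rewrite author's own statement) =====
-- stated objective: simpler
-- what changed: Replaces A's backward recursion over indices (re-checking the guard at every level) with a single reverse scan of the slice p[:index] for the nearest valid previous pressure, comparing once against it.
import Mathlib
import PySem

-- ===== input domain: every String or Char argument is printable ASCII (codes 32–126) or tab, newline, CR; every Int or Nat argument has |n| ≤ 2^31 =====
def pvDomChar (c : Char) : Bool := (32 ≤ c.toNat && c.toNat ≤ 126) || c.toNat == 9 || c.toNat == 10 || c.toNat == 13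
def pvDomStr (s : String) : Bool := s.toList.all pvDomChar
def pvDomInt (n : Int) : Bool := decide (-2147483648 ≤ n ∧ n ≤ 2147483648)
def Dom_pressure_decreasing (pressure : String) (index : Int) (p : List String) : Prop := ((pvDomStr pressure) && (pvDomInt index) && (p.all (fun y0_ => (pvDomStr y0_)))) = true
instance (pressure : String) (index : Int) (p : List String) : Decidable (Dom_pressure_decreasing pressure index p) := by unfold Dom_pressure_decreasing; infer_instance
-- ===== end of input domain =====

-- B replaces A's backward recursion through indices by a direct reverse scan of the
-- slice p[:index] for the nearest valid previous pressure (simpler decomposition, same cost).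

-- ===== PORT A =====
-- Literal port of A's recursion; pyGet? = none is exactly where Python raises IndexError
-- (excluded by Pre_), the value returned there is immaterial.
def pressure_decreasing (pressure : String) (index : Int) (p : List String) : Bool :=
  if PySem.Str.isIn "-9999" pressure then true
  else if index = 0 then true
  else
    match h : PySem.List.pyGet? p (index - 1) with
    | none => true
    | some previous_pressure =>
      if PySem.Str.isIn "-9999" previous_pressure then
        pressure_decreasing pressure (index - 1) p
      else
        decide (pressure < previous_pressure)
termination_by (index + p.length).toNat
decreasing_by
  have hin : PySem.Raise.InRange p.length (index - 1) := by
    by_contra hc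
    rw [(PySem.List.pyGet?_eq_none_iff p (index - 1)).mpr hc] at h
    simp at h
  unfold PySem.Raise.InRange at hin
  omega

-- ===== PORT B =====
-- Port of Source B: the for-loop over reversed(p[:index]) with early return is List.find?
-- on the reversed slice.
def pressure_decreasing_alt (pressure : String) (index : Int) (p : List String) : Bool :=
  if PySem.Str.isIn "-9999" pressure then true
  else
    match (PySem.List.slice p none (some index)).reverse.find?
            (fun prev => !PySem.Str.isIn "-9999" prev) with
    | some prev => decide (pressure < prev)
    | none => true

-- ===== PRECONDITION & SPEC =====
-- Pre_ excludes exactly the inputs on which A raises IndexError: index beyond the list on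
-- the right, or a negative index whose backward walk (with Python's wraparound) runs past
-- the front of the list without meeting a valid pressure.
def Pre_pressure_decreasing (pressure : String) (index : Int) (p : List String) : Prop :=
  PySem.Str.isIn "-9999" pressure = true ∨
  (0 ≤ index ∧ index ≤ p.length) ∨
  (index < 0 ∧ ∃ x ∈ p.take ((p.length : Int) + index).toNat, PySem.Str.isIn "-9999" x = false)
instance (pressure : String) (index : Int) (p : List String) : Decidable (Pre_pressure_decreasing pressure index p) := by unfold Pre_pressure_decreasing; infer_instance

def pvWitness_pressure_decreasing : String × Int × List String := ("995.1", 2, ["1000.0", "-9999", "990.0"])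

def Spec_pressure_decreasing (pressure : String) (index : Int) (p : List String) (out : Bool) : Prop := out = pressure_decreasing_alt pressure index p
instance (pressure : String) (index : Int) (p : List String) (out : Bool) : Decidable (Spec_pressure_decreasing pressure index p out) := by unfold Spec_pressure_decreasing; infer_instance

-- ===== CLAIM (what is proved, stated in full; the proofs are below) =====
def Claim_equal_pressure_decreasing : Prop := ∀ (pressure : String) (index : Int) (p : List String), Dom_pressure_decreasing pressure index p → Pre_pressure_decreasing pressure index p → Spec_pressure_decreasing pressure index p (pressure_decreasing pressure index p)

-- ===== LEMMAS AND PROOFS =====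

-- The body of B's scan, as a recursion over the reversed prefix.
def goRev (pressure : String) : List String → Bool
  | [] => true
  | prev :: rest =>
    if PySem.Str.isIn "-9999" prev then goRev pressure rest else decide (pressure < prev)

-- B's find?-match equals goRev on any list.
lemma find?_eq_goRev (pressure : String) (l : List String) :
    (match l.find? (fun prev => !PySem.Str.isIn "-9999" prev) with
     | some prev => decide (pressure < prev)
     | none => true) = goRev pressure l := by
  induction l with
  | nil => simp [goRev]
  | cons x xs ih =>
    cases hx : PySem.Str.isIn "-9999" x with
    | true =>
      simp only [List.find?, hx, Bool.not_true]
      rw [goRev, if_pos hx]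
      exact ih
    | false =>
      have hx' : ¬ (PySem.Str.isIn "-9999" x = true) := by rw [hx]; simp
      simp only [List.find?, hx, Bool.not_false]
      rw [goRev, if_neg hx']

lemma take_succ_reverse (p : List String) (m : Nat) (hm : m < p.length) :
    (p.take (m + 1)).reverse = p[m] :: (p.take m).reverse := by
  rw [List.take_add_one, List.getElem?_eq_getElem hm]
  simp

-- One unfolding step of A when the guard is false and the lookup succeeds.
lemma pd_step (pressure : String) (index : Int) (p : List String) (v : String)
    (hg : PySem.Str.isIn "-9999" pressure = false) (hne : index ≠ 0)
    (hget : PySem.List.pyGet? p (index - 1) = some v) :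
    pressure_decreasing pressure index p =
      (if PySem.Str.isIn "-9999" v then pressure_decreasing pressure (index - 1) p
       else decide (pressure < v)) := by
  rw [pressure_decreasing]
  simp only [hg, Bool.false_eq_true, if_false]
  rw [if_neg hne]
  split
  next heq => rw [hget] at heq; simp at heq
  next prev heq =>
    rw [hget] at heq
    have hpv : prev = v := by injection heq with h2; exact h2.symm
    subst hpv
    rfl

-- A at a nonnegative index m equals goRev on the reversed prefix of length m.
lemma A_eq_goRev_nonneg (pressure : String) (p : List String)
    (hg : PySem.Str.isIn "-9999" pressure = false) :
    ∀ m : Nat, m ≤ p.length →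
      pressure_decreasing pressure (m : Int) p = goRev pressure ((p.take m).reverse) := by
  intro m
  induction m with
  | zero => intro _; rw [pressure_decreasing]; simp [goRev]
  | succ m ih =>
    intro hle
    have hm : m < p.length := by omega
    have hc : (((m + 1 : Nat)) : Int) - 1 = (m : Int) := by push_cast; ring
    have hget : PySem.List.pyGet? p ((((m + 1 : Nat)) : Int) - 1) = some p[m] := by
      rw [hc, PySem.List.pyGet?_natCast, List.getElem?_eq_getElem hm]
    rw [pd_step pressure _ p p[m] hg (by push_cast; omega) hget,
        take_succ_reverse p m hm, goRev, hc]
    cases hx : PySem.Str.isIn "-9999" p[m] with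
    | true => simpa using ih (by omega)
    | false => simp

-- A at a negative index equals goRev on the reversed wrapped prefix, provided that prefix
-- contains a valid pressure (otherwise A raises; such inputs are outside Pre_).
lemma A_eq_goRev_neg (pressure : String) (p : List String)
    (hg : PySem.Str.isIn "-9999" pressure = false) :
    ∀ m : Nat, ∀ index : Int, index < 0 → (p.length : Int) + index = (m : Int) →
      (∃ x ∈ p.take m, PySem.Str.isIn "-9999" x = false) →
      pressure_decreasing pressure index p = goRev pressure ((p.take m).reverse) := by
  intro m
  induction m with
  | zero => intro index _ _ hex; simp at hex
  | succ m ih =>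
    intro index hneg hm hex
    have hmlt : m < p.length := by omega
    have hget : PySem.List.pyGet? p (index - 1) = some p[m] := by
      have hk : index - 1 = -(((p.length - m : Nat) : Int)) := by
        have : ((p.length - m : Nat) : Int) = (p.length : Int) - (m : Int) := by omega
        omega
      rw [hk, PySem.List.pyGet?_neg_natCast p (p.length - m) (by omega) (by omega)]
      have h2 : p.length - (p.length - m) = m := by omega
      rw [h2, List.getElem?_eq_getElem hmlt]
    rw [pd_step pressure index p p[m] hg (by omega) hget, take_succ_reverse p m hmlt, goRev]
    cases hx : PySem.Str.isIn "-9999" p[m] with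
    | true =>
      have hex' : ∃ x ∈ p.take m, PySem.Str.isIn "-9999" x = false := by
        obtain ⟨x, hxmem, hxv⟩ := hex
        rw [List.take_add_one, List.getElem?_eq_getElem hmlt] at hxmem
        simp only [Option.toList_some, List.mem_append, List.mem_singleton] at hxmem
        rcases hxmem with h | h
        · exact ⟨x, h, hxv⟩
        · subst h; rw [hx] at hxv; exact absurd hxv (by simp)
      simpa using ih (index - 1) (by omega) (by omega) hex'
    | false => simp

-- The slice p[:index] is the corresponding take, in both sign cases.
lemma slice_nonneg (p : List String) (index : Int) (h : 0 ≤ index) :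
    PySem.List.slice p none (some index) = p.take index.toNat :=
  PySem.List.slice_to p h

lemma slice_neg (p : List String) (index : Int) (h : index < 0) :
    PySem.List.slice p none (some index) = p.take ((p.length : Int) + index).toNat := by
  have hk : (some index : Option Int) = some (-(((-index).toNat : Nat) : Int)) := by
    congr 1; omega
  rw [hk, PySem.List.slice_to_neg_natCast p (-index).toNat (by omega)]
  congr 1
  omega

-- ===== VERDICT (by name: the statement is the Claim_ definition above) =====
theorem pressure_decreasing_spec : Claim_equal_pressure_decreasing := by
  intro pressure index p _ hpre
  unfold Spec_pressure_decreasing pressure_decreasing_alt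
  by_cases hg : PySem.Str.isIn "-9999" pressure
  · rw [pressure_decreasing, if_pos hg, if_pos hg]
  · have hg' : PySem.Str.isIn "-9999" pressure = false := by simpa using hg
    simp only [hg', Bool.false_eq_true, if_false]
    rw [find?_eq_goRev]
    rcases hpre with h | ⟨h0, h1⟩ | ⟨hneg, hex⟩
    · exact absurd h (by simpa using hg)
    · rw [slice_nonneg p index h0]
      have hidx : index = ((index.toNat : Nat) : Int) := by omega
      rw [hidx]
      exact A_eq_goRev_nonneg pressure p hg' index.toNat (by omega)
    · rw [slice_neg p index hneg]
      have htn : ((p.length : Int) + index).toNat ≠ 0 := by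
        intro h0
        rcases hex with ⟨x, hxmem, _⟩
        rw [h0] at hxmem
        simp at hxmem
      exact A_eq_goRev_neg pressure p hg' ((p.length : Int) + index).toNat index hneg
        (by omega) hex
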